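-- pv_equiv track=rewrite | github.com/ptourne/pim-squad | tp2/algoritmos/test/algoritmo.py | _ganancias_parciales
-- ===== SOURCE A (Python) =====
-- def _ganancias_parciales(n, esfuerzos, energias):
--     matriz_ganancias = []
--     for i in range(n):
--         ganancias_dia = [0] * (i+1)
--         for j in range(i+1):
--             ganancias_dia[j] = _ganancia_parcial(i, j, esfuerzos[i], energias[j] , matriz_ganancias)
--         matriz_ganancias.append(ganancias_dia)
--     return matriz_ganancias
--
-- def _ganancia_parcial(i, j, esfuerzo_en_i, energia_en_j, matriz_ganancias):
--     if i == 0: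
--         return _ganancia(esfuerzo_en_i, energia_en_j)
--
--     if j == 0:
--         return _ganancia(esfuerzo_en_i, energia_en_j) + _ganancia_maxima_dia_i(i - 2, matriz_ganancias)
--
--     return _ganancia(esfuerzo_en_i, energia_en_j) + matriz_ganancias[i-1][j-1]
--
-- def _ganancia(esfuerzo_en_i, energia_en_j):
--     return min(esfuerzo_en_i, energia_en_j)
--
-- def _ganancia_maxima_dia_i(i, matriz_ganancias):
--     if i == -1:
--         return 0
--     return max(matriz_ganancias[i])
-- ===== SOURCE B (Python) =====
-- def _ganancias_parciales(n, esfuerzos, energias):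
--     # Stage 1: pure diagonal prefix sums S (the recurrence with all max-offsets stripped out).
--     S = []
--     for i in range(n):
--         e = esfuerzos[i]
--         S.append([min(e, energias[j]) + (S[i - 1][j - 1] if j else 0)
--                   for j in range(i + 1)])
--     # Stage 2: base offset of each diagonal d (the amount injected at column 0 of row d):
--     # base[d] = max over row d-2 of (pure sum + that row's own diagonal offsets).
--     base = []
--     for d in range(n):
--         base.append(max(S[d - 2][j] + base[d - 2 - j] for j in range(d - 1))
--                     if d >= 2 else 0)
--     # Stage 3: superpose the two independent parts.
--     return [[S[i][j] + base[i - j] for j in range(i + 1)] for i in range(n)]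
-- ===== Notes on version B (the rewrite author's own statement) =====
-- stated objective: alternative
-- what changed: B replaces A's single coupled row-by-row DP (each cell read from the growing matrix, column 0 via a max() rescan of row i-2) by a superposition: it first builds the base-free diagonal prefix-sum matrix S, then solves a one-dimensional recurrence over diagonals for the offset base[d] injected at column 0, and finally returns S[i][j] + base[i-j]; Pre_ excludes inputs (1 <= n exceeding a list length) on which A raises IndexError.
import Mathlib
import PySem

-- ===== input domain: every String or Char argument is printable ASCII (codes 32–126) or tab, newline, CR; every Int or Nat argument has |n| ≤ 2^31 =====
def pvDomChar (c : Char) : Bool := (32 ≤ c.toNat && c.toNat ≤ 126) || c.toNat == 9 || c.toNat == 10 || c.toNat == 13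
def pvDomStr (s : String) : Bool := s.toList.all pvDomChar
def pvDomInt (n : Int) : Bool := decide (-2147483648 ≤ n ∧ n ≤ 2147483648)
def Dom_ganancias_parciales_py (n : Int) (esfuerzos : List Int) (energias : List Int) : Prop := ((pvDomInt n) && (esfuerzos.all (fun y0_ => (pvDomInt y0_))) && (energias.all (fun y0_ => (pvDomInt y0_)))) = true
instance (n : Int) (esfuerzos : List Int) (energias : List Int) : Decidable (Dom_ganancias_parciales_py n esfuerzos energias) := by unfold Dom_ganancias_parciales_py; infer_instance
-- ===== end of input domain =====

-- B computes the same matrix by superposition: a base-free diagonal prefix-sum matrix S,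
-- then a one-dimensional recurrence over diagonals for the base offsets, then S[i][j] + base[i-j].

-- ===== PORT A =====
-- helper _ganancia
def pyGanancia (e g : Int) : Int := min e g

-- helper _ganancia_maxima_dia_i  (max(list) on the Python side; rows are nonempty whenever
-- this is reached, so the getD defaults are never the returned value inside Pre_)
def pyGananciaMaximaDiaI (i : Int) (m : List (List Int)) : Int :=
  if i = -1 then 0
  else (PySem.List.max? ((PySem.List.pyGet? m i).getD []) (fun x => x)).getD 0

-- helper _ganancia_parcial
def pyGananciaParcial (i j e g : Int) (m : List (List Int)) : Int :=
  if i = 0 then pyGanancia e g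
  else if j = 0 then pyGanancia e g + pyGananciaMaximaDiaI (i - 2) m
  else pyGanancia e g +
    (PySem.List.pyGet? ((PySem.List.pyGet? m (i - 1)).getD []) (j - 1)).getD 0

def ganancias_parciales_py (n : Int) (esfuerzos : List Int) (energias : List Int) : List (List Int) :=
  (PySem.List.pyRange 0 n 1).foldl (fun matriz i =>
    matriz ++ [(PySem.List.pyRange 0 (i + 1) 1).map (fun j =>
      pyGananciaParcial i j ((PySem.List.pyGet? esfuerzos i).getD 0)
        ((PySem.List.pyGet? energias j).getD 0) matriz)]) []

-- ===== PORT B =====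
-- Stage 1: S[i][j] = min(esfuerzos[i], energias[j]) + (S[i-1][j-1] if j else 0)
def altStage1 (esfuerzos energias : List Int) (n : Int) : List (List Int) :=
  (PySem.List.pyRange 0 n 1).foldl (fun S i =>
    S ++ [(PySem.List.pyRange 0 (i + 1) 1).map (fun j =>
      min ((PySem.List.pyGet? esfuerzos i).getD 0) ((PySem.List.pyGet? energias j).getD 0) +
        (if j ≠ 0 then
          (PySem.List.pyGet? ((PySem.List.pyGet? S (i - 1)).getD []) (j - 1)).getD 0
         else 0))]) []

-- Stage 2: base[d] = max(S[d-2][j] + base[d-2-j] for j in range(d-1)) if d >= 2 else 0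
-- (the generator is nonempty whenever d >= 2, so the getD default is never the value)
def altStage2 (S : List (List Int)) (n : Int) : List Int :=
  (PySem.List.pyRange 0 n 1).foldl (fun base d =>
    base ++ [if 2 ≤ d then
        (PySem.List.max? ((PySem.List.pyRange 0 (d - 1) 1).map (fun j =>
          (PySem.List.pyGet? ((PySem.List.pyGet? S (d - 2)).getD []) j).getD 0 +
            (PySem.List.pyGet? base (d - 2 - j)).getD 0)) (fun x => x)).getD 0
      else 0]) []

-- Stage 3: superpose
def ganancias_parciales_py_alt (n : Int) (esfuerzos : List Int) (energias : List Int) : List (List Int) :=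
  let S := altStage1 esfuerzos energias n
  let base := altStage2 S n
  (PySem.List.pyRange 0 n 1).map (fun i =>
    (PySem.List.pyRange 0 (i + 1) 1).map (fun j =>
      (PySem.List.pyGet? ((PySem.List.pyGet? S i).getD []) j).getD 0 +
        (PySem.List.pyGet? base (i - j)).getD 0))

-- ===== PRECONDITION & SPEC =====
-- Pre_ excludes exactly the inputs where Python A raises IndexError: 1 ≤ n but n exceeds
-- the length of esfuerzos or of energias (B raises there too).
def Pre_ganancias_parciales_py (n : Int) (esfuerzos : List Int) (energias : List Int) : Prop :=
  n ≤ 0 ∨ (n ≤ esfuerzos.length ∧ n ≤ energias.length)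
instance (n : Int) (esfuerzos : List Int) (energias : List Int) : Decidable (Pre_ganancias_parciales_py n esfuerzos energias) := by unfold Pre_ganancias_parciales_py; infer_instance
def pvWitness_ganancias_parciales_py : Int × List Int × List Int := (3, [2, 5, 4], [3, 1, 6])

def Spec_ganancias_parciales_py (n : Int) (esfuerzos : List Int) (energias : List Int) (out : List (List Int)) : Prop := out = ganancias_parciales_py_alt n esfuerzos energias
instance (n : Int) (esfuerzos : List Int) (energias : List Int) (out : List (List Int)) : Decidable (Spec_ganancias_parciales_py n esfuerzos energias out) := by unfold Spec_ganancias_parciales_py; infer_instance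

-- ===== CLAIM (what is proved, stated in full; the proofs are below) =====
def Claim_equal_ganancias_parciales_py : Prop := ∀ (n : Int) (esfuerzos : List Int) (energias : List Int), Dom_ganancias_parciales_py n esfuerzos energias → Pre_ganancias_parciales_py n esfuerzos energias → Spec_ganancias_parciales_py n esfuerzos energias (ganancias_parciales_py n esfuerzos energias)

-- ===== LEMMAS AND PROOFS =====

-- value-level semantics of one cell, Nat-indexed (proof-side only)
def gmin (esf ene : List Int) (i j : Nat) : Int :=
  min ((PySem.List.pyGet? esf (i : Int)).getD 0) ((PySem.List.pyGet? ene (j : Int)).getD 0)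

-- pure diagonal prefix sum
def dS (esf ene : List Int) : Nat → Nat → Int
  | i, 0 => gmin esf ene i 0
  | i, j+1 => gmin esf ene i (j+1) + dS esf ene (i-1) j

-- base offset of diagonal d
def bB (esf ene : List Int) : Nat → Int
  | d =>
    if 2 ≤ d then
      (PySem.List.max? ((List.range (d-1)).map
        (fun j => dS esf ene (d-2) j + bB esf ene (d-2-j))) (fun x => x)).getD 0
    else 0
  termination_by d => d
  decreasing_by omega

def cellG (esf ene : List Int) (i j : Nat) : Int := dS esf ene i j + bB esf ene (i-j)

def tMat (esf ene : List Int) (k : Nat) : List (List Int) :=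
  (List.range k).map (fun i => (List.range (i+1)).map (fun j => cellG esf ene i j))

theorem bB_two_le (esf ene : List Int) (d : Nat) (h : 2 ≤ d) :
    bB esf ene d = (PySem.List.max? ((List.range (d-1)).map
      (fun j => cellG esf ene (d-2) j)) (fun x => x)).getD 0 := by
  rw [bB, if_pos h]; rfl

theorem bB_lt_two (esf ene : List Int) (d : Nat) (h : d < 2) : bB esf ene d = 0 := by
  rw [bB, if_neg (by omega)]

-- cellG recurrence along the diagonal
theorem cellG_succ (esf ene : List Int) (i j : Nat) (hj : j + 1 ≤ i) :
    cellG esf ene i (j+1) = gmin esf ene i (j+1) + cellG esf ene (i-1) j := by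
  unfold cellG
  rw [dS, show i - (j+1) = (i-1) - j by omega]
  ring

theorem tMat_get (esf ene : List Int) (k i : Nat) (h : i < k) :
    (PySem.List.pyGet? (tMat esf ene k) (i : Int)).getD [] =
      (List.range (i+1)).map (fun j => cellG esf ene i j) := by
  simp [tMat, h]

-- one cell of A's row k, computed against the cell-semantics matrix
theorem cell_row (esf ene : List Int) (k j : Nat) (hj : j < k + 1) :
    pyGananciaParcial (k : Int) (j : Int) ((PySem.List.pyGet? esf (k : Int)).getD 0)
      ((PySem.List.pyGet? ene (j : Int)).getD 0) (tMat esf ene k) = cellG esf ene k j := by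
  unfold pyGananciaParcial pyGanancia
  by_cases hk : k = 0
  · subst hk
    have hj0 : j = 0 := by omega
    subst hj0
    rw [if_pos (show ((0:Nat):Int) = 0 by norm_num)]
    simp [cellG, dS, gmin, bB_lt_two esf ene 0 (by omega)]
  · rw [if_neg (by exact_mod_cast hk)]
    by_cases hjz : j = 0
    · subst hjz
      rw [if_pos (show ((0:Nat):Int) = 0 by norm_num)]
      by_cases hk1 : k = 1
      · subst hk1
        rw [show ((1:Nat):Int) - 2 = -1 by decide, pyGananciaMaximaDiaI, if_pos rfl]
        simp [cellG, dS, gmin, bB_lt_two esf ene 1 (by omega)]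
      · have h2 : 2 ≤ k := by omega
        rw [pyGananciaMaximaDiaI, if_neg (by omega),
            show (k : Int) - 2 = ((k - 2 : Nat) : Int) by omega,
            tMat_get _ _ _ _ (by omega), show k - 2 + 1 = k - 1 by omega,
            cellG, Nat.sub_zero, dS, bB_two_le esf ene k h2]
        simp [gmin]
    · have hj1 : 1 ≤ j := by omega
      rw [if_neg (by exact_mod_cast hjz),
          show (k : Int) - 1 = ((k - 1 : Nat) : Int) by omega,
          tMat_get _ _ _ _ (by omega),
          show (j : Int) - 1 = ((j - 1 : Nat) : Int) by omega]
      have : (PySem.List.pyGet? ((List.range (k-1+1)).map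
          (fun j => cellG esf ene (k-1) j)) ((j-1 : Nat) : Int)).getD 0 =
          cellG esf ene (k-1) (j-1) := by
        simp [show j - 1 < k - 1 + 1 by omega]
      rw [this, show j = (j-1) + 1 by omega, cellG_succ _ _ _ _ (by omega)]
      simp [gmin, show j - 1 + 1 = j by omega]

-- A's matrix after the first k iterations of the outer loop
def aMat (esfuerzos energias : List Int) (k : Nat) : List (List Int) :=
  (PySem.List.pyRange 0 (k : Int) 1).foldl (fun matriz i =>
    matriz ++ [(PySem.List.pyRange 0 (i + 1) 1).map (fun j =>
      pyGananciaParcial i j ((PySem.List.pyGet? esfuerzos i).getD 0)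
        ((PySem.List.pyGet? energias j).getD 0) matriz)]) []

theorem aMat_succ (esf ene : List Int) (k : Nat) :
    aMat esf ene (k + 1) = aMat esf ene k ++
      [(PySem.List.pyRange 0 ((k : Int) + 1) 1).map (fun j =>
        pyGananciaParcial (k : Int) j ((PySem.List.pyGet? esf (k : Int)).getD 0)
          ((PySem.List.pyGet? ene j).getD 0) (aMat esf ene k))] := by
  unfold aMat
  conv_lhs => rw [show ((k + 1 : Nat) : Int) = (k : Int) + 1 by push_cast; ring,
      PySem.List.pyRange_one_succ_right (by positivity)]
  rw [List.foldl_append]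
  rfl

theorem tMat_succ (esf ene : List Int) (k : Nat) :
    tMat esf ene (k + 1) = tMat esf ene k ++
      [(List.range (k+1)).map (fun j => cellG esf ene k j)] := by
  unfold tMat
  simp [List.range_succ]

theorem aMat_eq (esf ene : List Int) (k : Nat) : aMat esf ene k = tMat esf ene k := by
  induction k with
  | zero => rfl
  | succ k ih =>
    rw [aMat_succ, ih, tMat_succ]
    congr 1
    rw [show (k : Int) + 1 = ((k + 1 : Nat) : Int) by push_cast; ring,
        PySem.List.pyRange_zero_natCast, List.map_map]
    congr 1
    apply List.map_congr_left
    intro j hj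
    exact cell_row esf ene k j (List.mem_range.mp hj)

theorem ganancias_parciales_py_eq (n : Int) (esf ene : List Int) :
    ganancias_parciales_py n esf ene = tMat esf ene n.toNat := by
  rw [← aMat_eq]
  unfold ganancias_parciales_py aMat
  by_cases hn : 0 ≤ n
  · rw [show ((n.toNat : Nat) : Int) = n by omega]
  · rw [PySem.List.pyRange_one_eq_nil (by omega),
        PySem.List.pyRange_one_eq_nil (by omega)]

-- B, stage 1: the pure prefix-sum matrix
def sMat (esf ene : List Int) (k : Nat) : List (List Int) :=
  (List.range k).map (fun i => (List.range (i+1)).map (fun j => dS esf ene i j))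

theorem sMat_get (esf ene : List Int) (k i : Nat) (h : i < k) :
    (PySem.List.pyGet? (sMat esf ene k) (i : Int)).getD [] =
      (List.range (i+1)).map (fun j => dS esf ene i j) := by
  simp [sMat, h]

def sAux (esfuerzos energias : List Int) (k : Nat) : List (List Int) :=
  (PySem.List.pyRange 0 (k : Int) 1).foldl (fun S i =>
    S ++ [(PySem.List.pyRange 0 (i + 1) 1).map (fun j =>
      min ((PySem.List.pyGet? esfuerzos i).getD 0) ((PySem.List.pyGet? energias j).getD 0) +
        (if j ≠ 0 then
          (PySem.List.pyGet? ((PySem.List.pyGet? S (i - 1)).getD []) (j - 1)).getD 0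
         else 0))]) []

theorem sAux_succ (esf ene : List Int) (k : Nat) :
    sAux esf ene (k + 1) = sAux esf ene k ++
      [(PySem.List.pyRange 0 ((k : Int) + 1) 1).map (fun j =>
        min ((PySem.List.pyGet? esf (k : Int)).getD 0) ((PySem.List.pyGet? ene j).getD 0) +
          (if j ≠ 0 then
            (PySem.List.pyGet? ((PySem.List.pyGet? (sAux esf ene k) ((k : Int) - 1)).getD []) (j - 1)).getD 0
           else 0))] := by
  unfold sAux
  conv_lhs => rw [show ((k + 1 : Nat) : Int) = (k : Int) + 1 by push_cast; ring,
      PySem.List.pyRange_one_succ_right (by positivity)]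
  rw [List.foldl_append]
  rfl

theorem sAux_eq (esf ene : List Int) (k : Nat) : sAux esf ene k = sMat esf ene k := by
  induction k with
  | zero => rfl
  | succ k ih =>
    rw [sAux_succ, ih, show sMat esf ene (k+1) = sMat esf ene k ++
        [(List.range (k+1)).map (fun j => dS esf ene k j)] by
      unfold sMat; simp [List.range_succ]]
    congr 1
    rw [show (k : Int) + 1 = ((k + 1 : Nat) : Int) by push_cast; ring,
        PySem.List.pyRange_zero_natCast, List.map_map]
    congr 1
    apply List.map_congr_left
    intro j hj
    have hj' : j < k + 1 := List.mem_range.mp hj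
    simp only [Function.comp]
    by_cases hjz : j = 0
    · subst hjz
      rw [if_neg (by norm_num)]
      simp [dS, gmin]
    · have hj1 : 1 ≤ j := by omega
      rw [if_pos (by exact_mod_cast hjz),
          show (k : Int) - 1 = ((k - 1 : Nat) : Int) by omega,
          sMat_get _ _ _ _ (by omega),
          show (j : Int) - 1 = ((j - 1 : Nat) : Int) by omega]
      have : (PySem.List.pyGet? ((List.range (k-1+1)).map
          (fun j => dS esf ene (k-1) j)) ((j-1 : Nat) : Int)).getD 0 =
          dS esf ene (k-1) (j-1) := by
        simp [show j - 1 < k - 1 + 1 by omega]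
      rw [this, show j = (j-1) + 1 by omega, dS]
      simp [gmin, show j - 1 + 1 = j by omega]

-- B, stage 2: the base-offset table
def bAux (S : List (List Int)) (k : Nat) : List Int :=
  (PySem.List.pyRange 0 (k : Int) 1).foldl (fun base d =>
    base ++ [if 2 ≤ d then
        (PySem.List.max? ((PySem.List.pyRange 0 (d - 1) 1).map (fun j =>
          (PySem.List.pyGet? ((PySem.List.pyGet? S (d - 2)).getD []) j).getD 0 +
            (PySem.List.pyGet? base (d - 2 - j)).getD 0)) (fun x => x)).getD 0
      else 0]) []

theorem bAux_succ (S : List (List Int)) (k : Nat) :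
    bAux S (k + 1) = bAux S k ++
      [if 2 ≤ (k : Int) then
        (PySem.List.max? ((PySem.List.pyRange 0 ((k : Int) - 1) 1).map (fun j =>
          (PySem.List.pyGet? ((PySem.List.pyGet? S ((k : Int) - 2)).getD []) j).getD 0 +
            (PySem.List.pyGet? (bAux S k) ((k : Int) - 2 - j)).getD 0)) (fun x => x)).getD 0
      else 0] := by
  unfold bAux
  conv_lhs => rw [show ((k + 1 : Nat) : Int) = (k : Int) + 1 by push_cast; ring,
      PySem.List.pyRange_one_succ_right (by positivity)]
  rw [List.foldl_append]
  rfl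

theorem bAux_eq (esf ene : List Int) (m k : Nat) (hk : k ≤ m) :
    bAux (sMat esf ene m) k = (List.range k).map (bB esf ene) := by
  induction k with
  | zero => rfl
  | succ k ih =>
    rw [bAux_succ, ih (by omega), List.range_succ, List.map_append]
    congr 1
    by_cases h2 : 2 ≤ k
    · rw [if_pos (by exact_mod_cast h2), List.map_singleton,
          bB_two_le esf ene k h2,
          show (k : Int) - 1 = ((k - 1 : Nat) : Int) by omega,
          PySem.List.pyRange_zero_natCast, List.map_map]
      congr 2
      refine congrArg (fun l => PySem.List.max? l (fun x => x)) ?_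
      apply List.map_congr_left
      intro j hj
      have hj' : j < k - 1 := List.mem_range.mp hj
      simp only [Function.comp]
      rw [show (k : Int) - 2 = ((k - 2 : Nat) : Int) by omega,
          sMat_get _ _ _ _ (by omega), show k - 2 + 1 = k - 1 by omega,
          show ((k - 2 : Nat) : Int) - (j : Int) = ((k - 2 - j : Nat) : Int) by omega]
      have h1 : (PySem.List.pyGet? ((List.range (k-1)).map
          (fun j => dS esf ene (k-2) j)) ((j : Nat) : Int)).getD 0 =
          dS esf ene (k-2) j := by simp [hj']
      have h2' : (PySem.List.pyGet? ((List.range k).map (bB esf ene))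
          ((k - 2 - j : Nat) : Int)).getD 0 = bB esf ene (k-2-j) := by
        simp [show k - 2 - j < k by omega]
      rw [h1, h2']
      rfl
    · rw [if_neg (by exact_mod_cast h2), List.map_singleton,
          bB_lt_two esf ene k (by omega)]

theorem stage1_eq (esf ene : List Int) (n : Int) :
    altStage1 esf ene n = sMat esf ene n.toNat := by
  rw [← sAux_eq]
  unfold altStage1 sAux
  by_cases hn : 0 ≤ n
  · rw [show ((n.toNat : Nat) : Int) = n by omega]
  · rw [PySem.List.pyRange_one_eq_nil (by omega),
        PySem.List.pyRange_one_eq_nil (by omega)]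

theorem stage2_eq (esf ene : List Int) (n : Int) :
    altStage2 (sMat esf ene n.toNat) n = (List.range n.toNat).map (bB esf ene) := by
  rw [← bAux_eq esf ene n.toNat n.toNat le_rfl]
  unfold altStage2 bAux
  by_cases hn : 0 ≤ n
  · rw [show ((n.toNat : Nat) : Int) = n by omega]
  · rw [PySem.List.pyRange_one_eq_nil (by omega),
        PySem.List.pyRange_one_eq_nil (by omega)]

theorem final_eq (n : Int) (esf ene : List Int) :
    tMat esf ene n.toNat = ganancias_parciales_py_alt n esf ene := by
  simp only [ganancias_parciales_py_alt]
  rw [stage1_eq, stage2_eq]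
  by_cases hn : 0 ≤ n
  · conv_rhs => rw [show n = ((n.toNat : Nat) : Int) by omega]
    simp only [Int.toNat_natCast]
    rw [PySem.List.pyRange_zero_natCast, List.map_map]
    unfold tMat
    apply List.map_congr_left
    intro i hi
    have hi' : i < n.toNat := List.mem_range.mp hi
    simp only [Function.comp]
    rw [show ((i : Nat) : Int) + 1 = ((i + 1 : Nat) : Int) by push_cast; ring,
        PySem.List.pyRange_zero_natCast, List.map_map]
    apply List.map_congr_left
    intro j hj
    have hj' : j < i + 1 := List.mem_range.mp hj
    simp only [Function.comp]
    rw [sMat_get _ _ _ _ hi',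
        show ((i : Nat) : Int) - ((j : Nat) : Int) = ((i - j : Nat) : Int) by omega]
    have h1 : (PySem.List.pyGet? ((List.range (i+1)).map
        (fun j => dS esf ene i j)) ((j : Nat) : Int)).getD 0 = dS esf ene i j := by
      simp [hj']
    have h2 : (PySem.List.pyGet? ((List.range n.toNat).map (bB esf ene))
        ((i - j : Nat) : Int)).getD 0 = bB esf ene (i - j) := by
      simp [show i - j < n.toNat by omega]
    rw [h1, h2]
    rfl
  · rw [PySem.List.pyRange_one_eq_nil (by omega), show n.toNat = 0 by omega]
    rfl

-- ===== VERDICT (by name: the statement is the Claim_ definition above) =====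
theorem ganancias_parciales_py_spec : Claim_equal_ganancias_parciales_py := by
  intro n esf ene _ _
  unfold Spec_ganancias_parciales_py
  rw [ganancias_parciales_py_eq, final_eq]
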